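-- pv_equiv track=rewrite | github.com/Caglankaan/BOF-Roaster | helpers.py | pattern_gen
-- ===== SOURCE A (Python) =====
-- from string import ascii_uppercase, ascii_lowercase, digits
--
-- def pattern_gen(length):
--     pattern = ""
--     for upper in ascii_uppercase:
--         for lower in ascii_lowercase:
--             for digit in digits:
--                 if len(pattern) < length:
--                     pattern += upper + lower + digit
--                 else:
--                     out = pattern[:length]
--                     return out
--
--     return pattern[:length]
-- ===== SOURCE B (Python) =====
-- from string import ascii_uppercase, ascii_lowercase, digits
--
--
-- def _pg_char(i):
--     c, r = divmod(i, 3)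
--     if r == 0:
--         return ascii_uppercase[c // 260]
--     if r == 1:
--         return ascii_lowercase[(c // 10) % 26]
--     return digits[c % 10]
--
--
-- def pattern_gen(length):
--     return ''.join(_pg_char(i) for i in range(min(length, 20280)))
-- ===== Notes on version B (the rewrite author's own statement) =====
-- stated objective: alternative
-- what changed: Replaced the triple nested loop with string accumulation, early return and final slice by a closed-form per-position character formula (i//3 picks the triple, i%3 the upper/lower/digit slot) joined over range(min(length, 20280)).
import Mathlib
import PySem

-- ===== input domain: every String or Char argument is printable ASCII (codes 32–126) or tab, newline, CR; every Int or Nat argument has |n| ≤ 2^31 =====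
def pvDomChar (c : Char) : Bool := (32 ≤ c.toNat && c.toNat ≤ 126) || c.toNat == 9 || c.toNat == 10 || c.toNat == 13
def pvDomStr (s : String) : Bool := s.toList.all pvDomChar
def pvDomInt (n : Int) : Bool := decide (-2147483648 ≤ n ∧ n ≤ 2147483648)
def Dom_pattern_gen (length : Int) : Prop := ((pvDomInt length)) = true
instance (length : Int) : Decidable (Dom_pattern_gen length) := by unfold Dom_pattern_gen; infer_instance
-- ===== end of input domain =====

-- B replaces A's triple nested loop (string accumulation, early return, final slice) by a
-- closed-form per-position character formula joined over range(min(length, 20280)); alternative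
-- decomposition, same cost.

-- ===== PORT A =====
-- module constants: string.ascii_uppercase / ascii_lowercase / digits
def pgUpper : List Char := ['A','B','C','D','E','F','G','H','I','J','K','L','M','N','O','P','Q','R','S','T','U','V','W','X','Y','Z']
def pgLower : List Char := ['a','b','c','d','e','f','g','h','i','j','k','l','m','n','o','p','q','r','s','t','u','v','w','x','y','z']
def pgDigits : List Char := ['0','1','2','3','4','5','6','7','8','9']

-- innermost 'for digit in digits' loop; the early 'return pattern[:length]' becomes Except.error
def pgLoopD (length : Int) (u l : Char) : List Char → List Char → Except (List Char) (List Char)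
  | [], pattern => .ok pattern
  | d :: ds, pattern =>
    if (pattern.length : Int) < length then
      pgLoopD length u l ds (pattern ++ [u, l, d])
    else
      .error (PySem.List.slice pattern none (some length))

-- 'for lower in ascii_lowercase' loop
def pgLoopL (length : Int) (u : Char) : List Char → List Char → Except (List Char) (List Char)
  | [], pattern => .ok pattern
  | l :: ls, pattern =>
    match pgLoopD length u l pgDigits pattern with
    | .ok pattern' => pgLoopL length u ls pattern'
    | .error out => .error out

-- 'for upper in ascii_uppercase' loop
def pgLoopU (length : Int) : List Char → List Char → Except (List Char) (List Char)
  | [], pattern => .ok pattern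
  | u :: us, pattern =>
    match pgLoopL length u pgLower pattern with
    | .ok pattern' => pgLoopU length us pattern'
    | .error out => .error out

def pattern_gen (length : Int) : String :=
  match pgLoopU length pgUpper [] with
  | .error out => String.ofList out
  | .ok pattern => String.ofList (PySem.List.slice pattern none (some length))

-- ===== PORT B =====
-- _pg_char(i): the 1-char string as a List Char; the indexing is in range for every i the
-- caller produces (0 ≤ i < 20280), where pyGet? is some (an out-of-range i would be IndexError)
def pgChar (i : Int) : List Char :=
  let c := PySem.Int.floordiv i 3
  let r := PySem.Int.mod i 3
  if r = 0 then (PySem.List.pyGet? pgUpper (PySem.Int.floordiv c 260)).toList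
  else if r = 1 then (PySem.List.pyGet? pgLower (PySem.Int.mod (PySem.Int.floordiv c 10) 26)).toList
  else (PySem.List.pyGet? pgDigits (PySem.Int.mod c 10)).toList

def pattern_gen_alt (length : Int) : String :=
  String.ofList ((PySem.List.pyRange 0 (min length 20280) 1).flatMap pgChar)

-- ===== PRECONDITION & SPEC =====
def Spec_pattern_gen (length : Int) (out : String) : Prop := out = pattern_gen_alt length
instance (length : Int) (out : String) : Decidable (Spec_pattern_gen length out) := by unfold Spec_pattern_gen; infer_instance

-- ===== CLAIM (what is proved, stated in full; the proofs are below) =====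
def Claim_equal_pattern_gen : Prop := ∀ (length : Int), Dom_pattern_gen length → Spec_pattern_gen length (pattern_gen length)

-- ===== LEMMAS AND PROOFS =====

-- A's nested loops, flattened: one loop over the list of (upper, lower, digit) triples
def pgRunT (length : Int) : List (Char × Char × Char) → List Char → Except (List Char) (List Char)
  | [], pattern => .ok pattern
  | (u, l, d) :: ts, pattern =>
    if (pattern.length : Int) < length then
      pgRunT length ts (pattern ++ [u, l, d])
    else
      .error (PySem.List.slice pattern none (some length))

def pgFlat (ts : List (Char × Char × Char)) : List Char :=
  ts.flatMap (fun t => [t.1, t.2.1, t.2.2])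

def pgT : List (Char × Char × Char) :=
  pgUpper.flatMap (fun u => pgLower.flatMap (fun l => pgDigits.map (fun d => (u, l, d))))

theorem pgRunT_append (length : Int) (ts ts' : List (Char × Char × Char)) (p : List Char) :
    pgRunT length (ts ++ ts') p =
      match pgRunT length ts p with
      | .ok q => pgRunT length ts' q
      | .error e => .error e := by
  induction ts generalizing p with
  | nil => rfl
  | cons t ts ih =>
    obtain ⟨u, l, d⟩ := t
    simp only [List.cons_append, pgRunT]
    split
    · exact ih _
    · rfl

theorem pgLoopD_eq (length : Int) (u l : Char) (ds : List Char) (p : List Char) :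
    pgLoopD length u l ds p = pgRunT length (ds.map (fun d => (u, l, d))) p := by
  induction ds generalizing p with
  | nil => rfl
  | cons d ds ih =>
    simp only [pgLoopD, List.map_cons, pgRunT]
    split
    · exact ih _
    · rfl

theorem pgLoopL_eq (length : Int) (u : Char) (ls : List Char) (p : List Char) :
    pgLoopL length u ls p =
      pgRunT length (ls.flatMap (fun l => pgDigits.map (fun d => (u, l, d)))) p := by
  induction ls generalizing p with
  | nil => rfl
  | cons l ls ih =>
    simp only [pgLoopL, List.flatMap_cons, pgRunT_append, pgLoopD_eq]
    cases h : pgRunT length (pgDigits.map (fun d => (u, l, d))) p with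
    | ok q => simp [ih]
    | error e => simp

theorem pgLoopU_eq (length : Int) (us : List Char) (p : List Char) :
    pgLoopU length us p =
      pgRunT length
        (us.flatMap (fun u => pgLower.flatMap (fun l => pgDigits.map (fun d => (u, l, d))))) p := by
  induction us generalizing p with
  | nil => rfl
  | cons u us ih =>
    simp only [pgLoopU, List.flatMap_cons, pgRunT_append, pgLoopL_eq]
    cases h : pgRunT length (pgLower.flatMap fun l => pgDigits.map fun d => (u, l, d)) p with
    | ok q => simp [ih]
    | error e => simp

theorem pg_slice_nil (length : Int) :
    PySem.List.slice ([] : List Char) none (some length) = [] := by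
  rcases le_or_gt 0 length with h | h
  · rw [PySem.List.slice_to _ h]; simp
  · have hk : 0 < (-length).toNat := by omega
    have hl : length = -(((-length).toNat : Nat) : Int) := by omega
    rw [hl, PySem.List.slice_to_neg_natCast _ _ hk]
    simp

-- the loop invariant: from pattern p the run either appends every remaining triple (all length
-- checks pass) or stops with the truncated result
theorem pgRunT_run (length : Int) (ts : List (Char × Char × Char)) (p : List Char)
    (hp : 0 ≤ length ∨ p = []) :
    pgRunT length ts p =
      if ts = [] then .ok p
      else if (p.length : Int) + 3 * (ts.length : Int) < length + 3 then .ok (p ++ pgFlat ts)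
      else .error ((p ++ pgFlat ts).take length.toNat) := by
  induction ts generalizing p with
  | nil => rfl
  | cons t ts ih =>
    obtain ⟨u, l, d⟩ := t
    simp only [pgRunT, List.length_cons, reduceCtorEq, if_neg, not_false_eq_true]
    by_cases hc : (p.length : Int) < length
    · have h0 : (0:Int) ≤ length := le_of_lt (lt_of_le_of_lt (by positivity) hc)
      rw [if_pos hc, ih (p ++ [u, l, d]) (Or.inl h0)]
      by_cases hts : ts = []
      · subst hts
        rw [if_pos rfl,
          if_pos (by simp only [List.length_nil, Nat.cast_zero, Nat.cast_add, Nat.cast_one]; omega)]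
        simp [pgFlat]
      · rw [if_neg hts]
        have hiff : ((p ++ [u, l, d]).length : Int) + 3 * (ts.length : Int) < length + 3 ↔
            (p.length : Int) + 3 * ((ts.length : Int) + 1) < length + 3 := by
          simp only [List.length_append, List.length_cons, List.length_nil]
          push_cast; omega
        by_cases hcond : (p.length : Int) + 3 * ((ts.length : Int) + 1) < length + 3
        · rw [if_pos (hiff.mpr hcond), if_pos (by push_cast at hcond ⊢; omega)]
          simp [pgFlat]
        · rw [if_neg (fun h => hcond (hiff.mp h)), if_neg (by push_cast at hcond ⊢; omega)]
          simp [pgFlat]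
    · rw [if_neg hc]
      have hcond : ¬ ((p.length : Int) + 3 * ((ts.length : Int) + 1) < length + 3) := by
        have h1 : (0:Int) ≤ (ts.length : Int) := Int.natCast_nonneg _
        omega
      rw [if_neg (by push_cast at hcond ⊢; omega)]
      rcases hp with h0 | hnil
      · rw [PySem.List.slice_to _ h0]
        have hle : length.toNat ≤ p.length := by omega
        rw [List.take_append, Nat.sub_eq_zero_of_le hle, List.take_zero, List.append_nil]
      · subst hnil
        have hl0 : length ≤ 0 := by simpa using hc
        rw [pg_slice_nil]
        have h2 : length.toNat = 0 := by omega
        simp [h2]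

theorem pgFlat_length_eq (ts : List (Char × Char × Char)) : (pgFlat ts).length = 3 * ts.length := by
  induction ts with
  | nil => rfl
  | cons t ts ih => simp [pgFlat] at ih ⊢; omega

theorem pg_flatMap_congr {α β : Type} (l : List α) (f g : α → List β)
    (h : ∀ a ∈ l, f a = g a) : l.flatMap f = l.flatMap g := by
  induction l with
  | nil => rfl
  | cons x xs ih =>
    rw [List.flatMap_cons, List.flatMap_cons, h x (by simp),
      ih (fun a ha => h a (List.mem_cons_of_mem _ ha))]

theorem pg_range_mul_flatMap {α : Type} (m n : Nat) (f : Nat → List α) :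
    (List.range (m * n)).flatMap f
      = (List.range m).flatMap (fun a => (List.range n).flatMap (fun j => f (n * a + j))) := by
  induction m with
  | zero => simp
  | succ m ih =>
    rw [Nat.succ_mul, List.range_add, List.flatMap_append, ih, List.range_succ,
      List.flatMap_append, List.flatMap_map]
    simp [Nat.mul_comm]

theorem pg_flatMap_eq_range {α β : Type} (c : α) (F : α → List β) (xs : List α) :
    xs.flatMap F = (List.range xs.length).flatMap (fun a => F (xs.getD a c)) := by
  induction xs with
  | nil => rfl
  | cons x xs ih =>
    rw [List.flatMap_cons, List.length_cons, List.range_succ_eq_map, List.flatMap_cons,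
      List.flatMap_map]
    simp only [List.getD_cons_zero, Nat.succ_eq_add_one, List.getD_cons_succ]
    rw [ih]

-- B's character formula, on a natural index
theorem pgChar_nat (k : Nat) :
    pgChar (k : Int) =
      if k % 3 = 0 then (pgUpper[k / 3 / 260]?).toList
      else if k % 3 = 1 then (pgLower[k / 3 / 10 % 26]?).toList
      else (pgDigits[k / 3 % 10]?).toList := by
  simp only [pgChar]
  rw [show (3:Int) = ((3:Nat):Int) from rfl, show (260:Int) = ((260:Nat):Int) from rfl,
    show (10:Int) = ((10:Nat):Int) from rfl, show (26:Int) = ((26:Nat):Int) from rfl]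
  simp only [PySem.Int.floordiv_natCast, PySem.Int.mod_natCast, PySem.List.pyGet?_natCast,
    Nat.cast_eq_zero, Nat.cast_eq_one]

theorem pgChar_eval (k : Nat) (hk : k < 20280) :
    pgChar (k : Int) =
      if k % 3 = 0 then [pgUpper.getD (k / 3 / 260) ' ']
      else if k % 3 = 1 then [pgLower.getD (k / 3 / 10 % 26) ' ']
      else [pgDigits.getD (k / 3 % 10) ' '] := by
  rw [pgChar_nat]
  split_ifs with h0 h1
  · rw [List.getElem?_eq_getElem (show k / 3 / 260 < pgUpper.length by show _ < 26; omega),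
      List.getD_eq_getElem pgUpper ' ' (show k / 3 / 260 < pgUpper.length by show _ < 26; omega)]
    rfl
  · rw [List.getElem?_eq_getElem (show k / 3 / 10 % 26 < pgLower.length by show _ < 26; omega),
      List.getD_eq_getElem pgLower ' ' (show k / 3 / 10 % 26 < pgLower.length by show _ < 26; omega)]
    rfl
  · rw [List.getElem?_eq_getElem (show k / 3 % 10 < pgDigits.length by show _ < 10; omega),
      List.getD_eq_getElem pgDigits ' ' (show k / 3 % 10 < pgDigits.length by show _ < 10; omega)]
    rfl

theorem pg_lenone (k : Nat) (hk : k < 20280) : (pgChar (k : Int)).length = 1 := by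
  rw [pgChar_eval k hk]
  split_ifs <;> rfl

-- one triple of B's characters is one triple of A's list
theorem pgChar_triple (a b e : Nat) (ha : a < 26) (hb : b < 26) (he : e < 10) :
    (List.range 3).flatMap (fun r => pgChar ((780 * a + (30 * b + (3 * e + r)) : Nat) : Int))
      = [pgUpper.getD a ' ', pgLower.getD b ' ', pgDigits.getD e ' '] := by
  rw [show List.range 3 = [0, 1, 2] from rfl]
  simp only [List.flatMap_cons, List.flatMap_nil, List.append_nil]
  rw [pgChar_eval _ (by omega), pgChar_eval _ (by omega), pgChar_eval _ (by omega)]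
  rw [if_pos (show (780 * a + (30 * b + (3 * e + 0))) % 3 = 0 by omega)]
  rw [if_neg (show ¬ (780 * a + (30 * b + (3 * e + 1))) % 3 = 0 by omega),
    if_pos (show (780 * a + (30 * b + (3 * e + 1))) % 3 = 1 by omega)]
  rw [if_neg (show ¬ (780 * a + (30 * b + (3 * e + 2))) % 3 = 0 by omega),
    if_neg (show ¬ (780 * a + (30 * b + (3 * e + 2))) % 3 = 1 by omega)]
  rw [show (780 * a + (30 * b + (3 * e + 0))) / 3 / 260 = a by omega,
    show (780 * a + (30 * b + (3 * e + 1))) / 3 / 10 % 26 = b by omega,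
    show (780 * a + (30 * b + (3 * e + 2))) / 3 % 10 = e by omega]
  rfl

-- B's characters over the full range are exactly the flattening of A's triple list
theorem pgChar_full :
    (List.range 20280).flatMap (fun k : Nat => pgChar (k : Int)) = pgFlat pgT := by
  have hL : (List.range 20280).flatMap (fun k : Nat => pgChar (k : Int))
      = (List.range 26).flatMap (fun a =>
          (List.range 26).flatMap (fun b =>
            (List.range 10).flatMap (fun e =>
              [pgUpper.getD a ' ', pgLower.getD b ' ', pgDigits.getD e ' ']))) := by
    rw [show (20280 : Nat) = 26 * 780 from rfl, pg_range_mul_flatMap]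
    refine pg_flatMap_congr _ _ _ (fun a ha => ?_)
    rw [show (780 : Nat) = 26 * 30 from rfl, pg_range_mul_flatMap]
    refine pg_flatMap_congr _ _ _ (fun b hb => ?_)
    rw [show (30 : Nat) = 10 * 3 from rfl, pg_range_mul_flatMap]
    refine pg_flatMap_congr _ _ _ (fun e he => ?_)
    exact pgChar_triple a b e (List.mem_range.mp ha) (List.mem_range.mp hb) (List.mem_range.mp he)
  have hR : pgFlat pgT
      = (List.range 26).flatMap (fun a =>
          (List.range 26).flatMap (fun b =>
            (List.range 10).flatMap (fun e =>
              [pgUpper.getD a ' ', pgLower.getD b ' ', pgDigits.getD e ' ']))) := by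
    have h1 : pgFlat pgT
        = pgUpper.flatMap (fun u => pgLower.flatMap (fun l => pgDigits.flatMap (fun d => [u, l, d]))) := by
      simp only [pgFlat, pgT, List.flatMap_assoc, List.flatMap_map]
    rw [h1, pg_flatMap_eq_range ' ' _ pgUpper, show pgUpper.length = 26 from rfl]
    refine pg_flatMap_congr _ _ _ (fun a _ => ?_)
    rw [pg_flatMap_eq_range ' ' _ pgLower, show pgLower.length = 26 from rfl]
    refine pg_flatMap_congr _ _ _ (fun b _ => ?_)
    rw [pg_flatMap_eq_range ' ' _ pgDigits, show pgDigits.length = 10 from rfl]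
  rw [hL, hR]

theorem pgFlat_pgT_length : (pgFlat pgT).length = 20280 := by
  rw [← pgChar_full, List.length_flatMap,
    List.map_congr_left (fun k hk => pg_lenone k (List.mem_range.mp hk))]
  rw [List.map_const', List.sum_replicate, List.length_range]
  simp

theorem pgT_length : pgT.length = 6760 := by
  have h := pgFlat_pgT_length
  rw [pgFlat_length_eq] at h
  omega

-- A computes the first length.toNat characters of the full pattern
theorem pattern_gen_eq_take (length : Int) :
    pattern_gen length = String.ofList ((pgFlat pgT).take length.toNat) := by
  unfold pattern_gen
  rw [pgLoopU_eq]
  rw [show pgUpper.flatMap (fun u => pgLower.flatMap (fun l => pgDigits.map (fun d => (u, l, d))))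
      = pgT from rfl]
  rw [pgRunT_run length pgT [] (Or.inr rfl)]
  have hne : pgT ≠ [] := by
    intro h
    have h6 := pgT_length
    rw [h] at h6
    simp at h6
  rw [if_neg hne]
  split_ifs with hbig
  · have h0 : (0:Int) ≤ length := by
      rw [pgT_length] at hbig
      simp only [List.length_nil, Nat.cast_zero, Nat.cast_ofNat] at hbig
      omega
    show String.ofList (PySem.List.slice (pgFlat pgT) none (some length)) = _
    rw [PySem.List.slice_to _ h0]
  · show String.ofList (((pgFlat pgT)).take length.toNat) = _
    rfl

theorem pg_flatMap_take (m : Nat) (hm : m ≤ 20280) :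
    (List.range m).flatMap (fun k : Nat => pgChar (k : Int)) = (pgFlat pgT).take m := by
  have hsplit : List.range 20280
      = List.range m ++ (List.range (20280 - m)).map (fun x => m + x) := by
    rw [← List.range_add]
    congr 1
    omega
  have hlen : ((List.range m).flatMap (fun k : Nat => pgChar (k : Int))).length = m := by
    rw [List.length_flatMap]
    have h : (List.range m).map (fun k : Nat => (pgChar (k : Int)).length)
        = (List.range m).map (fun _ => 1) := by
      apply List.map_congr_left
      intro k hk
      exact pg_lenone k (lt_of_lt_of_le (List.mem_range.mp hk) hm)
    rw [h, List.map_const', List.sum_replicate, List.length_range]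
    simp
  rw [← pgChar_full, hsplit, List.flatMap_append, List.take_left' hlen]

-- B also computes the first length.toNat characters of the full pattern
theorem pattern_gen_alt_eq_take (length : Int) :
    pattern_gen_alt length = String.ofList ((pgFlat pgT).take length.toNat) := by
  unfold pattern_gen_alt
  rw [PySem.List.pyRange_one, List.flatMap_map]
  simp only [Int.sub_zero, Int.zero_add]
  have hm : (min length 20280).toNat ≤ 20280 := by omega
  rw [pg_flatMap_take _ hm]
  rcases le_or_gt length 20280 with h | h
  · have h1 : (min length 20280).toNat = length.toNat := by omega
    rw [h1]
  · have h1 : (min length 20280).toNat = 20280 := by omega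
    have h2 : 20280 ≤ length.toNat := by omega
    rw [h1, List.take_of_length_le (by rw [pgFlat_pgT_length]),
      List.take_of_length_le (by rw [pgFlat_pgT_length]; exact h2)]

-- ===== VERDICT (by name: the statement is the Claim_ definition above) =====
theorem pattern_gen_spec : Claim_equal_pattern_gen := by
  intro length _
  unfold Spec_pattern_gen
  rw [pattern_gen_eq_take, pattern_gen_alt_eq_take]
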